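-- pv_equiv track=rewrite | github.com/WarshallG/Parallel-String-Matching | parallel_matching.py | compute_witness_parallel_process
-- ===== SOURCE A (Python) =====
-- import concurrent.futures
-- import math
-- from concurrent.futures import ThreadPoolExecutor
--
-- def calculate_witness(pattern, j):
--     m = len(pattern)
--     if j == 1:
--         return 0  # WIT(1) 定义为 0
--
--     for w in range(1, m - j + 2):
--         if pattern[j - 1 + w - 1] != pattern[w - 1]:
--             return w
--     return 0  # 如果完全匹配
--
-- def process_block(pattern, start, end):
--     block_result = []
--     for j in range(start, end + 1):
--         block_result.append((j, calculate_witness(pattern, j)))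
--     return block_result
--
-- def compute_witness_parallel_process(pattern, m, num_threads=4):
--     wit_length = m // 2 + 1 if m % 2 == 0 else m // 2 + 2  # 奇数要多算一个
--     wit = [0] * wit_length
--
--     # 计算每块的范围
--     total_tasks = wit_length - 1
--     block_size = math.ceil(total_tasks / num_threads)
--     blocks = [
--         (i * block_size + 1, min((i + 1) * block_size, total_tasks))
--         for i in range(num_threads)
--     ]
--
--     # 并行处理
--     with ThreadPoolExecutor(max_workers=num_threads) as executor:
--         futures = [executor.submit(process_block, pattern, start, end) for start, end in blocks]
--         results = []
--         for future in concurrent.futures.as_completed(futures):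
--             results.extend(future.result())
--
--     # 收集结果到 wit 数组
--     for j, w in results:
--         wit[j] = w
--
--     return wit
-- ===== SOURCE B (Python) =====
-- import math
--
--
-- def compute_witness_parallel_process(pattern, m, num_threads=4):
--     # Sequential O(n + m) re-implementation: one Z-function pass over the pattern
--     # replaces the per-position rescan; num_threads only affects scheduling in the
--     # original, never the returned array.
--     wit_length = m // 2 + 1 if m % 2 == 0 else m // 2 + 2
--     n = len(pattern)
--     z = [0] * n
--     if n:
--         z[0] = n
--     l = r = 0
--     for i in range(1, n):
--         zi = 0
--         if i < r:
--             zi = min(r - i, z[i - l])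
--         while i + zi < n and pattern[zi] == pattern[i + zi]:
--             zi += 1
--         z[i] = zi
--         if i + zi > r:
--             l, r = i, i + zi
--     wit = []
--     for j in range(max(wit_length, 0)):
--         i = j - 1
--         if 0 <= i < n and i + z[i] < n:
--             wit.append(z[i] + 1)
--         else:
--             wit.append(0)
--     return wit
-- ===== Notes on version B (the rewrite author's own statement) =====
-- stated objective: faster
-- what changed: Replaces the per-shift naive rescan (calculate_witness) and the thread-pool block scaffolding by a single sequential Z-function pass over the pattern, reading each witness as Z[j-1]+1 when the mismatch lies inside the pattern and 0 otherwise.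
import Mathlib
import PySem

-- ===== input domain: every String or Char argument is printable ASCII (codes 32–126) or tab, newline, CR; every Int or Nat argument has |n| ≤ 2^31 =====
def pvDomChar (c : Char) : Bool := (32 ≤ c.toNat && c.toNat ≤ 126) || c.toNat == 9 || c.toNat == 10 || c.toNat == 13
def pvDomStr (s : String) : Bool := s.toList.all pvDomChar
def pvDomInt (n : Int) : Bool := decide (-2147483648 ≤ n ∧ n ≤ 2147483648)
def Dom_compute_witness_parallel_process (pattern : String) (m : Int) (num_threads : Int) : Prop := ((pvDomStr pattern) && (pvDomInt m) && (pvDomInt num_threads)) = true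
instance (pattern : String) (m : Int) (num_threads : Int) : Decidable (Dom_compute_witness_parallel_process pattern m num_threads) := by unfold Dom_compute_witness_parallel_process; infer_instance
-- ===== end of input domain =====

-- B replaces A's per-shift rescan + thread-pool scaffolding by one sequential Z-function
-- pass (objective: faster, asymptotically). Equality of RETURN values is what is proved;
-- neither program mutates its arguments.

-- ===== PORT A =====

-- 'for w in range(1, m - j + 2): if pattern[j-1+w-1] != pattern[w-1]: return w' / 'return 0'
-- (both indices are provably in range whenever the loop runs, so pyGet? never returns none)
def pvCalcLoop (p : List Char) (j : Int) (ws : List Int) : Int :=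
  match ws with
  | [] => 0
  | w :: rest =>
      if PySem.List.pyGet? p (j - 1 + w - 1) ≠ PySem.List.pyGet? p (w - 1) then w
      else pvCalcLoop p j rest

def pvCalculateWitness (pattern : String) (j : Int) : Int :=
  let m : Int := PySem.Str.len pattern
  if j = 1 then 0
  else pvCalcLoop pattern.toList j (PySem.List.pyRange 1 (m - j + 2) 1)

def pvProcessBlock (pattern : String) (start fin : Int) : List (Int × Int) :=
  (PySem.List.pyRange start (fin + 1) 1).foldl
    (fun acc j => acc ++ [(j, pvCalculateWitness pattern j)]) []

def compute_witness_parallel_process (pattern : String) (m : Int) (num_threads : Int) : List Int :=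
  let wit_length : Int :=
    if PySem.Int.mod m 2 = 0 then PySem.Int.floordiv m 2 + 1 else PySem.Int.floordiv m 2 + 2
  let wit : List Int := List.replicate wit_length.toNat 0  -- [0]*k ( = [] for k ≤ 0, as toNat gives)
  let total_tasks := wit_length - 1
  -- math.ceil(total_tasks / num_threads): the float ceil is exact as ceiling division for
  -- |total_tasks| ≤ 2^31, ported as -((-t) // nt)
  let block_size := -(PySem.Int.floordiv (-total_tasks) num_threads)
  let blocks := (PySem.List.pyRange 0 num_threads 1).map
    (fun i => (i * block_size + 1, min ((i + 1) * block_size) total_tasks))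
  -- ThreadPoolExecutor/as_completed gathers results in completion order, but 'wit[j] = w'
  -- writes pairwise-distinct indices j, so the output is scheduling-independent;
  -- ported in submission order.
  let results := blocks.foldl (fun acc se => acc ++ pvProcessBlock pattern se.1 se.2) []
  -- 'wit[j] = w': j is provably in range (1..total_tasks), so List.set is exact
  results.foldl (fun w jw => w.set jw.1.toNat jw.2) wit

-- ===== PORT B =====

-- the 'while i + zi < n and pattern[zi] == pattern[i+zi]: zi += 1' loop of Source B;
-- fuel = an upper bound on the remaining iterations (the guard forces s < p.length),
-- making the while loop a structural recursion
def pvZext (p : List Char) (i : Nat) : Nat → Nat → Nat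
  | 0, s => s
  | fuel + 1, s =>
      if i + s < p.length ∧ p.getD s ' ' = p.getD (i + s) ' ' then pvZext p i fuel (s + 1) else s

-- one iteration of Source B's 'for i in range(1, n)' loop; state (z, l, r)
def pvZStep (p : List Char) (st : List Nat × Nat × Nat) (i : Nat) : List Nat × Nat × Nat :=
  let zi0 := if i < st.2.2 then min (st.2.2 - i) (st.1.getD (i - st.2.1) 0) else 0
  let zi := pvZext p i p.length zi0
  let z' := st.1.set i zi
  if st.2.2 < i + zi then (z', i, i + zi) else (z', st.2.1, st.2.2)

-- 'z = [0]*n; if n: z[0] = n' then the loop (indices are Nat: all of Source B's indices are ≥ 0)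
def pvZFun (p : List Char) : List Nat :=
  let n := p.length
  let z0 : List Nat := match n with | 0 => [] | Nat.succ k => n :: List.replicate k 0
  ((List.range' 1 (n - 1)).foldl (pvZStep p) (z0, 0, 0)).1

def compute_witness_parallel_process_alt (pattern : String) (m : Int) (num_threads : Int) : List Int :=
  let p := pattern.toList
  let n := p.length
  let wit_length : Int :=
    if PySem.Int.mod m 2 = 0 then PySem.Int.floordiv m 2 + 1 else PySem.Int.floordiv m 2 + 2
  let z := pvZFun p
  -- Source B: for j in range(max(wit_length, 0)): i = j - 1; 0 <= i is '1 ≤ j' here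
  (List.range wit_length.toNat).map (fun j =>
    if 1 ≤ j ∧ j - 1 < n ∧ j - 1 + z.getD (j - 1) 0 < n
    then ((z.getD (j - 1) 0 : Nat) : Int) + 1 else 0)

-- ===== PRECONDITION & SPEC =====

-- Pre_ excludes exactly the inputs on which A raises: num_threads ≤ 0
-- (ZeroDivisionError from math.ceil(t/0) at 0, ValueError from ThreadPoolExecutor below 0).
def Pre_compute_witness_parallel_process (pattern : String) (m : Int) (num_threads : Int) : Prop :=
  1 ≤ num_threads
instance (pattern : String) (m : Int) (num_threads : Int) : Decidable (Pre_compute_witness_parallel_process pattern m num_threads) := by unfold Pre_compute_witness_parallel_process; infer_instance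

def pvWitness_compute_witness_parallel_process : String × Int × Int := ("aba", 3, 2)

def Spec_compute_witness_parallel_process (pattern : String) (m : Int) (num_threads : Int) (out : List Int) : Prop := out = compute_witness_parallel_process_alt pattern m num_threads
instance (pattern : String) (m : Int) (num_threads : Int) (out : List Int) : Decidable (Spec_compute_witness_parallel_process pattern m num_threads out) := by unfold Spec_compute_witness_parallel_process; infer_instance

-- ===== CLAIM (what is proved, stated in full; the proofs are below) =====
def Claim_equal_compute_witness_parallel_process : Prop := ∀ (pattern : String) (m : Int) (num_threads : Int), Dom_compute_witness_parallel_process pattern m num_threads → Pre_compute_witness_parallel_process pattern m num_threads → Spec_compute_witness_parallel_process pattern m num_threads (compute_witness_parallel_process pattern m num_threads)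


-- ===== LEMMAS AND PROOFS =====

-- length of the common prefix of two lists
def pvLcp : List Char → List Char → Nat
  | a :: x, b :: y => if a = b then pvLcp x y + 1 else 0
  | _, _ => 0

-- Z-function specification: Z(i) = lcp of the pattern with its suffix starting at i
def pvZ (p : List Char) (i : Nat) : Nat := pvLcp p (p.drop i)

lemma pvLcp_le_right (x y : List Char) : pvLcp x y ≤ y.length := by
  induction x generalizing y with
  | nil => simp [pvLcp]
  | cons a x ih =>
    cases y with
    | nil => simp [pvLcp]
    | cons b y =>
      simp only [pvLcp, List.length_cons]
      split
      · have := ih y; omega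
      · omega

lemma pvLcp_self (x : List Char) : pvLcp x x = x.length := by
  induction x with
  | nil => simp [pvLcp]
  | cons a x ih => simp [pvLcp, ih]

lemma pvLcp_getD (x y : List Char) (k : Nat) (d : Char) (h : k < pvLcp x y) :
    x.getD k d = y.getD k d := by
  induction x generalizing y k with
  | nil => simp [pvLcp] at h
  | cons a x ih =>
    cases y with
    | nil => simp [pvLcp] at h
    | cons b y =>
      simp only [pvLcp] at h
      by_cases hab : a = b
      · rw [if_pos hab] at h
        cases k with
        | zero => simp [hab]
        | succ k => simpa using ih y k (by omega)
      · simp [hab] at h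

lemma pvLcp_mismatch (x y : List Char) (d : Char)
    (hx : pvLcp x y < x.length) (hy : pvLcp x y < y.length) :
    x.getD (pvLcp x y) d ≠ y.getD (pvLcp x y) d := by
  induction x generalizing y with
  | nil => simp at hx
  | cons a x ih =>
    cases y with
    | nil => simp at hy
    | cons b y =>
      by_cases hab : a = b
      · have he : pvLcp (a :: x) (b :: y) = pvLcp x y + 1 := by simp [pvLcp, hab]
        rw [he] at hx hy ⊢
        simpa using ih y (by simpa using hx) (by simpa using hy)
      · have he : pvLcp (a :: x) (b :: y) = 0 := by simp [pvLcp, hab]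
        rw [he]
        simpa using hab

lemma pvLcp_ge (x y : List Char) (t : Nat) (d : Char)
    (h : ∀ k, k < t → k < x.length ∧ k < y.length ∧ x.getD k d = y.getD k d) :
    t ≤ pvLcp x y := by
  induction x generalizing y t with
  | nil =>
    cases t with
    | zero => omega
    | succ t => have := (h 0 (by omega)).1; simp at this
  | cons a x ih =>
    cases y with
    | nil =>
      cases t with
      | zero => omega
      | succ t => have := (h 0 (by omega)).2.1; simp at this
    | cons b y =>
      cases t with
      | zero => omega
      | succ t =>
        have h0 := (h 0 (by omega)).2.2
        simp only [List.getD_cons_zero] at h0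
        have ht : t ≤ pvLcp x y := by
          apply ih y t
          intro k hk
          have := h (k + 1) (by omega)
          simpa using this
        rw [show pvLcp (a :: x) (b :: y) = pvLcp x y + 1 from by simp [pvLcp, h0]]
        omega

lemma pvLcp_drop (x y : List Char) (s : Nat) (h : s ≤ pvLcp x y) :
    pvLcp x y = s + pvLcp (x.drop s) (y.drop s) := by
  induction s generalizing x y with
  | zero => simp
  | succ s ih =>
    cases x with
    | nil => simp [pvLcp] at h
    | cons a x =>
      cases y with
      | nil => simp [pvLcp] at h
      | cons b y =>
        by_cases hab : a = b
        · have he : pvLcp (a :: x) (b :: y) = pvLcp x y + 1 := by simp [pvLcp, hab]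
          rw [he] at h ⊢
          have := ih x y (by omega)
          simp only [List.drop_succ_cons]
          omega
        · simp [pvLcp, hab] at h

lemma pvGetD_drop (p : List Char) (i k : Nat) (d : Char) :
    (p.drop i).getD k d = p.getD (i + k) d := by
  simp [List.getD_eq_getElem?_getD, List.getElem?_drop]

lemma pvZ_match (p : List Char) (i k : Nat) (d : Char) (h : k < pvZ p i) :
    p.getD k d = p.getD (i + k) d := by
  have := pvLcp_getD p (p.drop i) k d h
  rwa [pvGetD_drop] at this

lemma pvZ_lt (p : List Char) (i : Nat) (hi : i < p.length) : i + pvZ p i ≤ p.length := by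
  have := pvLcp_le_right p (p.drop i)
  simp only [List.length_drop] at this
  unfold pvZ
  omega

lemma pvZ_mismatch (p : List Char) (i : Nat) (d : Char) (h : i + pvZ p i < p.length) :
    p.getD (pvZ p i) d ≠ p.getD (i + pvZ p i) d := by
  have hzr := pvLcp_le_right p (p.drop i)
  simp only [List.length_drop] at hzr
  simp only [pvZ] at h ⊢
  have hm := pvLcp_mismatch p (p.drop i) d (by omega)
    (by simp only [List.length_drop]; omega)
  rwa [pvGetD_drop] at hm

lemma pvZ_zero (p : List Char) : pvZ p 0 = p.length := by
  simp [pvZ, pvLcp_self]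

-- the while loop extends any sound start value to the true Z value
lemma pvZext_eq (p : List Char) (i : Nat) :
    ∀ fuel s : Nat, p.length ≤ fuel + s →
      pvZext p i fuel s = s + pvLcp (p.drop s) (p.drop (i + s)) := by
  intro fuel
  induction fuel with
  | zero =>
    intro s hs
    have h1 : p.drop s = [] := List.drop_eq_nil_of_le (by omega)
    rw [pvZext, h1]
    cases p.drop (i + s) <;> simp [pvLcp]
  | succ fuel ih =>
    intro s hs
    rw [pvZext]
    by_cases hc : i + s < p.length ∧ p.getD s ' ' = p.getD (i + s) ' '
    · obtain ⟨hlt, heq⟩ := hc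
      have hslt : s < p.length := by omega
      have hd1 : p.drop s = p[s] :: p.drop (s + 1) := List.drop_eq_getElem_cons hslt
      have hd2 : p.drop (i + s) = p[i + s] :: p.drop (i + s + 1) := List.drop_eq_getElem_cons hlt
      have heq' : p[s] = p[i + s] := by
        rwa [List.getD_eq_getElem p ' ' hslt, List.getD_eq_getElem p ' ' hlt] at heq
      rw [if_pos ⟨hlt, heq⟩, ih (s + 1) (by omega), hd1, hd2]
      have hstep : pvLcp (p[s] :: p.drop (s + 1)) (p[i + s] :: p.drop (i + s + 1))
          = pvLcp (p.drop (s + 1)) (p.drop (i + s + 1)) + 1 := by simp [pvLcp, heq']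
      rw [hstep, show i + (s + 1) = i + s + 1 from by omega]
      omega
    · rw [if_neg hc]
      rcases Nat.lt_or_ge (i + s) p.length with hlt | hge
      · have hslt : s < p.length := by omega
        have hd1 : p.drop s = p[s] :: p.drop (s + 1) := List.drop_eq_getElem_cons hslt
        have hd2 : p.drop (i + s) = p[i + s] :: p.drop (i + s + 1) := List.drop_eq_getElem_cons hlt
        have hne : p[s] ≠ p[i + s] := by
          intro he
          exact hc ⟨hlt, by rw [List.getD_eq_getElem p ' ' hslt, List.getD_eq_getElem p ' ' hlt, he]⟩
        rw [hd1, hd2]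
        simp [pvLcp, hne]
      · have h2 : p.drop (i + s) = [] := List.drop_eq_nil_of_le hge
        rw [h2]
        cases p.drop s <;> simp [pvLcp]

lemma pvZext_from_le (p : List Char) (i s : Nat) (h : s ≤ pvZ p i) :
    pvZext p i p.length s = pvZ p i := by
  rw [pvZext_eq p i p.length s (by omega)]
  have hdd : (p.drop i).drop s = p.drop (i + s) := by
    rw [List.drop_drop]
  have := pvLcp_drop p (p.drop i) s h
  rw [pvZ, this, hdd]

lemma pvZbox (p : List Char) (l i : Nat) (hl : l < i) (hil : i < l + pvZ p l) :
    min (l + pvZ p l - i) (pvZ p (i - l)) ≤ pvZ p i := by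
  have hZl_le : pvZ p l ≤ p.length - l := by
    have := pvLcp_le_right p (p.drop l)
    simpa [pvZ, List.length_drop] using this
  have hln : l + pvZ p l ≤ p.length := by
    rcases Nat.lt_or_ge l p.length with h | h
    · exact pvZ_lt p l h
    · have : p.drop l = [] := List.drop_eq_nil_of_le h
      rw [pvZ, this]
      cases p <;> simp [pvLcp] <;> omega
  apply pvLcp_ge p (p.drop i) _ ' '
  intro k hk
  have hk1 : i + k < l + pvZ p l := by omega
  have hk2 : k < pvZ p (i - l) := by omega
  have hin : i + k < p.length := by omega
  refine ⟨by omega, by simp only [List.length_drop]; omega, ?_⟩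
  have e1 : p.getD k ' ' = p.getD ((i - l) + k) ' ' := pvZ_match p (i - l) k ' ' hk2
  have e2 : p.getD ((i - l) + k) ' ' = p.getD (l + ((i - l) + k)) ' ' :=
    pvZ_match p l ((i - l) + k) ' ' (by omega)
  have e3 : l + ((i - l) + k) = i + k := by omega
  rw [pvGetD_drop, e1, e2, e3]

-- the z-box initialisation is sound
def pvInv (p : List Char) (st : List Nat × Nat × Nat) (i : Nat) : Prop :=
  st.1.length = p.length ∧
  (∀ k, k < i → k < p.length → st.1.getD k 0 = pvZ p k) ∧
  ((st.2.1 = 0 ∧ st.2.2 = 0) ∨ (1 ≤ st.2.1 ∧ st.2.1 < i ∧ st.2.2 = st.2.1 + pvZ p st.2.1))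

lemma pvZStep_inv (p : List Char) (st : List Nat × Nat × Nat) (i : Nat)
    (hinv : pvInv p st i) (h1 : 1 ≤ i) (h2 : i < p.length) :
    pvInv p (pvZStep p st i) (i + 1) := by
  obtain ⟨hlen, hz, hlr⟩ := hinv
  have hzi0 : (if i < st.2.2 then min (st.2.2 - i) (st.1.getD (i - st.2.1) 0) else 0) ≤ pvZ p i := by
    by_cases hir : i < st.2.2
    · rcases hlr with ⟨_, hr0⟩ | ⟨hl1, hli, hr⟩
      · omega
      · rw [if_pos hir]
        have hget : st.1.getD (i - st.2.1) 0 = pvZ p (i - st.2.1) :=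
          hz (i - st.2.1) (by omega) (by omega)
        rw [hget, hr]
        exact pvZbox p st.2.1 i hli (by omega)
    · rw [if_neg hir]; omega
  have hzi : pvZext p i p.length
      (if i < st.2.2 then min (st.2.2 - i) (st.1.getD (i - st.2.1) 0) else 0) = pvZ p i :=
    pvZext_from_le p i _ hzi0
  unfold pvZStep
  simp only [hzi]
  have hlen' : (st.1.set i (pvZ p i)).length = p.length := by simp [hlen]
  have hz' : ∀ k, k < i + 1 → k < p.length → (st.1.set i (pvZ p i)).getD k 0 = pvZ p k := by
    intro k hk hkn
    rcases Nat.lt_or_ge k i with hki | hki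
    · rw [List.getD_eq_getElem?_getD, List.getElem?_set_ne (by omega),
        ← List.getD_eq_getElem?_getD]
      exact hz k hki hkn
    · have hk' : k = i := by omega
      subst hk'
      rw [List.getD_eq_getElem?_getD, List.getElem?_set_self (by omega)]
      rfl
  by_cases hup : st.2.2 < i + pvZ p i
  · rw [if_pos hup]
    exact ⟨hlen', hz', Or.inr ⟨h1, Nat.lt_succ_self i, rfl⟩⟩
  · rw [if_neg hup]
    refine ⟨hlen', hz', ?_⟩
    rcases hlr with h | ⟨hl1, hli, hr⟩
    · exact Or.inl h
    · exact Or.inr ⟨hl1, Nat.lt_succ_of_lt hli, hr⟩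

lemma pvZFun_init (p : List Char) :
    pvInv p ((match p.length with | 0 => ([] : List Nat) | Nat.succ k => p.length :: List.replicate k 0), 0, 0) 1 := by
  refine ⟨?_, ?_, Or.inl ⟨rfl, rfl⟩⟩
  · cases hn : p.length with
    | zero => simp
    | succ k => simp
  · intro k hk hkn
    have hk0 : k = 0 := by omega
    subst hk0
    cases hn : p.length with
    | zero => omega
    | succ k => simp [pvZ_zero, hn]

lemma pvZFun_fold (p : List Char) :
    ∀ t, t ≤ p.length - 1 →
      pvInv p ((List.range' 1 t).foldl (pvZStep p)
        ((match p.length with | 0 => ([] : List Nat) | Nat.succ k => p.length :: List.replicate k 0), 0, 0)) (t + 1) := by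
  intro t
  induction t with
  | zero => intro _; simpa using pvZFun_init p
  | succ t ih =>
    intro ht
    rw [List.range'_1_concat, List.foldl_append]
    simp only [List.foldl_cons, List.foldl_nil]
    have hstep := pvZStep_inv p _ (1 + t)
      (by have := ih (by omega); simpa [Nat.add_comm 1 t] using this) (by omega) (by omega)
    simpa [Nat.add_comm 1 t] using hstep

lemma pvZFun_correct (p : List Char) :
    (pvZFun p).length = p.length ∧ ∀ k, k < p.length → (pvZFun p).getD k 0 = pvZ p k := by
  have h := pvZFun_fold p (p.length - 1) (le_refl _)
  obtain ⟨hlen, hz, _⟩ := h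
  unfold pvZFun
  exact ⟨hlen, fun k hk => hz k (by omega) hk⟩

-- ===== A side =====

-- core loop of calculate_witness: first mismatch position, expressed through pvZ
lemma pvCalcLoop_eq (p : List Char) (i : Nat) (h1 : 1 ≤ i) (h2 : i < p.length) :
    ∀ w0 : Nat, w0 ≤ pvZ p i →
      pvCalcLoop p ((i : Int) + 1) (PySem.List.pyRange ((w0 : Int) + 1) ((p.length : Int) - i + 1) 1)
        = if i + pvZ p i < p.length then ((pvZ p i : Int) + 1) else 0 := by
  have hZn : i + pvZ p i ≤ p.length := pvZ_lt p i h2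
  have main : ∀ d w0, w0 ≤ pvZ p i → pvZ p i - w0 = d →
      pvCalcLoop p ((i : Int) + 1) (PySem.List.pyRange ((w0 : Int) + 1) ((p.length : Int) - i + 1) 1)
        = if i + pvZ p i < p.length then ((pvZ p i : Int) + 1) else 0 := by
    intro d
    induction d with
    | zero =>
      intro w0 hw0 hd
      have hwZ : w0 = pvZ p i := by omega
      by_cases hin : i + pvZ p i < p.length
      · rw [PySem.List.pyRange_one_cons (by push_cast; omega)]
        simp only [pvCalcLoop]
        have e1 : (i : Int) + 1 - 1 + ((w0 : Int) + 1) - 1 = ((i + w0 : Nat) : Int) := by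
          push_cast; ring
        have e2 : (w0 : Int) + 1 - 1 = ((w0 : Nat) : Int) := by push_cast; ring
        rw [e1, e2, PySem.List.pyGet?_natCast, PySem.List.pyGet?_natCast,
          List.getElem?_eq_getElem (by omega), List.getElem?_eq_getElem (by omega)]
        have hne : p[i + w0] ≠ p[w0] := by
          have := pvZ_mismatch p i ' ' hin
          rw [List.getD_eq_getElem p ' ' (by omega), List.getD_eq_getElem p ' ' (by omega)] at this
          subst hwZ
          exact fun he => this he.symm
        rw [if_pos (by simpa using hne), if_pos hin, hwZ]
      · have hni : (p.length : Int) - i + 1 ≤ (w0 : Int) + 1 := by push_cast; omega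
        rw [PySem.List.pyRange_one_eq_nil hni]
        simp only [pvCalcLoop]
        rw [if_neg hin]
    | succ d ih =>
      intro w0 hw0 hd
      have hwZ : w0 < pvZ p i := by omega
      rw [PySem.List.pyRange_one_cons (by push_cast; omega)]
      simp only [pvCalcLoop]
      have e1 : (i : Int) + 1 - 1 + ((w0 : Int) + 1) - 1 = ((i + w0 : Nat) : Int) := by
        push_cast; ring
      have e2 : (w0 : Int) + 1 - 1 = ((w0 : Nat) : Int) := by push_cast; ring
      rw [e1, e2, PySem.List.pyGet?_natCast, PySem.List.pyGet?_natCast,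
        List.getElem?_eq_getElem (by omega), List.getElem?_eq_getElem (by omega)]
      have heq : p[w0] = p[i + w0] := by
        have := pvZ_match p i w0 ' ' hwZ
        rwa [List.getD_eq_getElem p ' ' (by omega), List.getD_eq_getElem p ' ' (by omega)] at this
      rw [if_neg (by simpa using heq.symm)]
      have e3 : (w0 : Int) + 1 + 1 = ((w0 + 1 : Nat) : Int) + 1 := by push_cast; ring
      calc pvCalcLoop p ((i : Int) + 1) (PySem.List.pyRange ((w0 : Int) + 1 + 1) ((p.length : Int) - i + 1) 1)
          = pvCalcLoop p ((i : Int) + 1) (PySem.List.pyRange (((w0 + 1 : Nat) : Int) + 1) ((p.length : Int) - i + 1) 1) := by rw [e3]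
        _ = _ := ih (w0 + 1) (by omega) (by omega)
  exact fun w0 hw0 => main (pvZ p i - w0) w0 hw0 rfl

-- per-shift value of calculate_witness
lemma pvCalculateWitness_eq (pattern : String) (j : Int) (hj : 1 ≤ j) :
    pvCalculateWitness pattern j =
      (if 2 ≤ j ∧ (j - 1).toNat < pattern.toList.length ∧
          (j - 1).toNat + pvZ pattern.toList (j - 1).toNat < pattern.toList.length
       then ((pvZ pattern.toList (j - 1).toNat : Int) + 1) else 0) := by
  unfold pvCalculateWitness
  by_cases hj1 : j = 1
  · subst hj1
    rw [if_pos rfl, if_neg (by rintro ⟨h2, _⟩; omega)]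
  · have hj2 : 2 ≤ j := by omega
    rw [if_neg hj1, PySem.Str.len_eq]
    have hji : ((j - 1).toNat : Int) = j - 1 := Int.toNat_of_nonneg (by omega)
    by_cases hin : (j - 1).toNat < pattern.toList.length
    · have h1i : 1 ≤ (j - 1).toNat := by omega
      have hmain := pvCalcLoop_eq pattern.toList (j - 1).toNat h1i hin 0 (Nat.zero_le _)
      have e1 : ((j - 1).toNat : Int) + 1 = j := by omega
      have e2 : ((0 : Nat) : Int) + 1 = 1 := by norm_num
      have e3 : (pattern.toList.length : Int) - ((j - 1).toNat : Int) + 1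
          = (pattern.toList.length : Int) - j + 2 := by omega
      rw [e1, e2, e3] at hmain
      rw [hmain]
      by_cases hz : (j - 1).toNat + pvZ pattern.toList (j - 1).toNat < pattern.toList.length
      · rw [if_pos hz, if_pos ⟨hj2, hin, hz⟩]
      · rw [if_neg hz, if_neg (by rintro ⟨_, _, h⟩; exact hz h)]
    · have hnil : (pattern.toList.length : Int) - j + 2 ≤ 1 := by omega
      rw [PySem.List.pyRange_one_eq_nil hnil]
      simp only [pvCalcLoop]
      rw [if_neg (by rintro ⟨_, h, _⟩; exact hin h)]


-- ===== scaffolding of A: blocks cover 1..total exactly once, in order =====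

lemma pvProcessBlock_eq (pattern : String) (s e : Int) :
    pvProcessBlock pattern s e
      = (PySem.List.pyRange s (e + 1) 1).map (fun j => (j, pvCalculateWitness pattern j)) := by
  unfold pvProcessBlock
  rw [PySem.List.foldl_append_singleton_eq_map]
  simp

lemma pvBlocksFold (pattern : String) (T bs : Int) (hT : 0 ≤ T) (hbs0 : 0 ≤ bs) :
    ∀ t : Nat,
      ((PySem.List.pyRange 0 (t : Int) 1).map
          (fun i => (i * bs + 1, min ((i + 1) * bs) T))).foldl
        (fun acc se => acc ++ pvProcessBlock pattern se.1 se.2) []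
      = (PySem.List.pyRange 1 (min ((t : Int) * bs) T + 1) 1).map
          (fun j => (j, pvCalculateWitness pattern j)) := by
  intro t
  induction t with
  | zero =>
    rw [show ((0 : Nat) : Int) = 0 from rfl, PySem.List.pyRange_one_eq_nil (le_refl 0)]
    rw [show min ((0 : Int) * bs) T = 0 from by rw [zero_mul]; exact min_eq_left hT]
    rw [PySem.List.pyRange_one_eq_nil (by omega)]
    simp
  | succ t ih =>
    have ht0 : (0 : Int) ≤ (t : Int) := by positivity
    rw [show ((t + 1 : Nat) : Int) = (t : Int) + 1 from by push_cast; ring,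
      PySem.List.pyRange_one_succ_right ht0, List.map_append, List.foldl_append, ih]
    simp only [List.map_cons, List.map_nil, List.foldl_cons, List.foldl_nil]
    rw [pvProcessBlock_eq, ← List.map_append]
    congr 1
    have hmono : (t : Int) * bs ≤ ((t : Int) + 1) * bs := by nlinarith
    have htbs : 0 ≤ (t : Int) * bs := mul_nonneg ht0 hbs0
    by_cases hc : T ≤ (t : Int) * bs
    · rw [min_eq_right hc, min_eq_right (le_trans hc hmono),
        show PySem.List.pyRange ((t : Int) * bs + 1) (T + 1) 1 = [] from
          PySem.List.pyRange_one_eq_nil (by omega), List.append_nil]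
    · rw [min_eq_left (by omega)]
      exact (PySem.List.pyRange_one_append 1 ((t : Int) * bs + 1)
        (min (((t : Int) + 1) * bs) T + 1) (by omega)
        (by have := le_min hmono (le_of_lt (by omega : (t : Int) * bs < T)); omega)).symm

-- writing the (j, w) pairs into wit in ascending j order
lemma pvSetFold (v : Nat → Int) (S : Nat) :
    ∀ t, t ≤ S →
      ((List.range t).map (fun k => (((1 + k : Nat) : Int), v (1 + k)))).foldl
        (fun w jw => w.set jw.1.toNat jw.2) (List.replicate (S + 1) 0)
      = 0 :: ((List.range t).map (fun k => v (1 + k)) ++ List.replicate (S - t) 0) := by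
  intro t
  induction t with
  | zero => intro _; simp [List.replicate_succ]
  | succ t ih =>
    intro ht
    rw [List.range_succ, List.map_append, List.foldl_append, ih (by omega)]
    simp only [List.map_cons, List.map_nil, List.foldl_cons, List.foldl_nil]
    have htn : (((1 + t : Nat) : Int)).toNat = 1 + t := by omega
    rw [htn]
    have hM : ((List.range t).map (fun k => v (1 + k))).length = t := by simp
    rw [show (1 + t) = ((List.range t).map (fun k => v (1 + k))).length + 1 from by omega]
    rw [List.set_cons_succ, List.set_append_right _ _ (by omega)]
    rw [show ((List.range t).map (fun k => v (1 + k))).length -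
        ((List.range t).map (fun k => v (1 + k))).length = 0 from by omega]
    rw [show S - t = (S - (t + 1)) + 1 from by omega, List.replicate_succ, List.set_cons_zero]
    simp
    rw [Nat.add_comm t 1]

-- a B-side output entry is exactly A's witness value for that shift
lemma pvBEntry (pattern : String) (j : Nat) (h1 : 1 ≤ j) :
    (if 1 ≤ j ∧ j - 1 < pattern.toList.length ∧
        j - 1 + (pvZFun pattern.toList).getD (j - 1) 0 < pattern.toList.length
     then (((pvZFun pattern.toList).getD (j - 1) 0 : Nat) : Int) + 1 else 0)
    = pvCalculateWitness pattern (j : Int) := by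
  obtain ⟨hlen, hz⟩ := pvZFun_correct pattern.toList
  rw [pvCalculateWitness_eq pattern (j : Int) (by omega)]
  have hji : ((j : Int) - 1).toNat = j - 1 := by omega
  rw [hji]
  by_cases hjn : j - 1 < pattern.toList.length
  · rw [hz (j - 1) hjn]
    by_cases hj2 : 2 ≤ j
    · have hj2' : (2 : Int) ≤ (j : Int) := by omega
      by_cases hcond : j - 1 + pvZ pattern.toList (j - 1) < pattern.toList.length
      · rw [if_pos ⟨h1, hjn, hcond⟩, if_pos ⟨hj2', hjn, hcond⟩]
      · rw [if_neg (by rintro ⟨_, _, h⟩; exact hcond h),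
          if_neg (by rintro ⟨_, _, h⟩; exact hcond h)]
    · have hj1 : j = 1 := by omega
      subst hj1
      rw [if_neg (by rintro ⟨_, _, h⟩; simp [pvZ_zero] at h),
        if_neg (by rintro ⟨h, _⟩; omega)]
  · rw [if_neg (by rintro ⟨_, h, _⟩; exact hjn h), if_neg (by rintro ⟨_, h, _⟩; exact hjn h)]

-- ===== VERDICT (by name: the statement is the Claim_ definition above) =====
theorem compute_witness_parallel_process_spec : Claim_equal_compute_witness_parallel_process := by
  intro pattern m nt hdom hpre
  unfold Pre_compute_witness_parallel_process at hpre
  unfold Spec_compute_witness_parallel_process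
  unfold compute_witness_parallel_process compute_witness_parallel_process_alt
  dsimp only
  set WL : Int := if PySem.Int.mod m 2 = 0 then PySem.Int.floordiv m 2 + 1
    else PySem.Int.floordiv m 2 + 2 with hWLdef
  set bs : Int := -PySem.Int.floordiv (-(WL - 1)) nt with hbsdef
  obtain ⟨hlow, hhigh⟩ :=
    (PySem.Int.neg_floordiv_neg_eq_iff_of_pos (a := WL - 1) (b := nt) (q := bs)
      (by omega)).mp hbsdef.symm
  by_cases hWL0 : WL ≤ 0
  · -- degenerate: wit_length ≤ 0, both sides are []
    have hbsneg : bs ≤ 0 := by nlinarith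
    have hres : ((PySem.List.pyRange 0 nt 1).map
          (fun i => (i * bs + 1, min ((i + 1) * bs) (WL - 1)))).foldl
        (fun acc se => acc ++ pvProcessBlock pattern se.1 se.2) [] = [] := by
      rw [PySem.List.foldl_congr_mem _ _ (fun acc _ => acc) _ ?_, List.foldl_fixed]
      intro acc se hse
      obtain ⟨i, hi, rfl⟩ := List.mem_map.mp hse
      have hi0 : 0 ≤ i := ((PySem.List.mem_pyRange_one).mp hi).1
      have hexp : (i + 1) * bs = i * bs + bs := by ring
      have hmin : min ((i + 1) * bs) (WL - 1) + 1 ≤ i * bs + 1 := by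
        have h1 : min ((i + 1) * bs) (WL - 1) ≤ (i + 1) * bs := min_le_left _ _
        omega
      rw [pvProcessBlock_eq, PySem.List.pyRange_one_eq_nil hmin, List.map_nil, List.append_nil]
    rw [hres]
    have hnat : WL.toNat = 0 := by omega
    simp [hnat]
  · -- main case: wit_length = S + 1, total = S ≥ 0
    push Not at hWL0
    have hT : (0 : Int) ≤ WL - 1 := by omega
    have hbs0 : 0 ≤ bs := by
      by_contra hb
      push Not at hb
      have : bs * nt ≤ bs := by nlinarith
      omega
    set S : Nat := (WL - 1).toNat with hSdef
    have hScast : (S : Int) = WL - 1 := by omega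
    have hntc : ((nt.toNat : Nat) : Int) = nt := by omega
    have hres := pvBlocksFold pattern (WL - 1) bs hT hbs0 nt.toNat
    rw [hntc] at hres
    rw [min_eq_right (by rw [mul_comm]; exact hhigh)] at hres
    rw [hres]
    have hlist : (PySem.List.pyRange 1 (WL - 1 + 1) 1).map
          (fun j => (j, pvCalculateWitness pattern j))
        = (List.range S).map (fun k => (((1 + k : Nat) : Int),
            pvCalculateWitness pattern ((1 + k : Nat) : Int))) := by
      apply List.ext_getElem
      · simp only [List.length_map, PySem.List.length_pyRange_one, List.length_range]
        omega
      · intro idx h1 h2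
        simp only [List.getElem_map, PySem.List.getElem_pyRange_one, List.getElem_range]
        have e : (1 : Int) + (idx : Int) = ((1 + idx : Nat) : Int) := by push_cast; ring
        rw [e]
    rw [hlist]
    have hwit : WL.toNat = S + 1 := by omega
    rw [hwit]
    rw [pvSetFold (fun j => pvCalculateWitness pattern (j : Int)) S S (le_refl S)]
    rw [show S - S = 0 from by omega, List.replicate_zero, List.append_nil]
    -- B side
    rw [List.range_succ_eq_map, List.map_cons, List.map_map]
    rw [if_neg (by rintro ⟨h, _⟩; omega)]
    congr 1
    apply List.map_congr_left
    intro k _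
    have := pvBEntry pattern (k + 1) (by omega)
    calc pvCalculateWitness pattern ((1 + k : Nat) : Int)
        = pvCalculateWitness pattern ((k + 1 : Nat) : Int) := by rw [Nat.add_comm]
      _ = (if 1 ≤ k + 1 ∧ k + 1 - 1 < pattern.toList.length ∧
            k + 1 - 1 + (pvZFun pattern.toList).getD (k + 1 - 1) 0 < pattern.toList.length
           then (((pvZFun pattern.toList).getD (k + 1 - 1) 0 : Nat) : Int) + 1 else 0) :=
        (pvBEntry pattern (k + 1) (by omega)).symm
      _ = _ := by simp [Function.comp, Nat.succ_eq_add_one]
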